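-- pv_equiv track=rewrite | github.com/sari-wesg/ChirpBox | Miscellaneous/Example/LoRaWAN/Python_examples/ChirpBox_processing/uplink_PDR.py | bitmap_to_nodes
-- ===== SOURCE A (Python) =====
-- def bitmap_to_nodes(bitmap):
--     bitmap = int(bitmap, 16)
--     node_list = []
--     i = 0
--     while (bitmap):
--         i += 1
--         bitmap = bitmap >> 1
--         if(bitmap & 0b1):
--             node_list.append(i)
--
--     return node_list
-- ===== SOURCE B (Python) =====
-- def bitmap_to_nodes(bitmap):
--     # Traverse the binary-digit string of the parsed value (shifted once, as
--     # in the original: bit 0 is not reported) instead of looping with shifts.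
--     m = int(bitmap, 16) >> 1
--     s = bin(m)[2:] if m else ""
--     return [len(s) - idx for idx, ch in enumerate(s) if ch == '1'][::-1]
-- ===== Notes on version B (the rewrite author's own statement) =====
-- stated objective: idiomatic
-- what changed: Replaces the shift-and-mask while-loop (repeated >>1 and &1 with a manual counter) by a single traversal of the binary-digit string bin(int(bitmap,16)>>1), collecting len(s)-idx for each '1' character and reversing.
-- outside the precondition, e.g. on bitmap_to_nodes('-2'): A does not finish within the time limit, B returns [1]; on bitmap_to_nodes('zz'): A raises ValueError, B raises ValueError
import Mathlib
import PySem

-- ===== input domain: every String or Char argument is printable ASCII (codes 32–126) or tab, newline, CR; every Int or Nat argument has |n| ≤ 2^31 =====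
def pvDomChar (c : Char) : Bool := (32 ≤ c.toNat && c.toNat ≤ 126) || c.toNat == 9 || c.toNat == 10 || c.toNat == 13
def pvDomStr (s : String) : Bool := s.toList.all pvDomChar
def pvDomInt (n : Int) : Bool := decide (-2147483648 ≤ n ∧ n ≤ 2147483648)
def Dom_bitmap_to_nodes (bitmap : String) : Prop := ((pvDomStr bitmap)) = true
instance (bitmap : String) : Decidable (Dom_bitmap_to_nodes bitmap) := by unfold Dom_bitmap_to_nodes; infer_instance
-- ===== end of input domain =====

-- B replaces A's shift-and-mask while-loop by a single traversal of the binary-digit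
-- string bin(int(bitmap,16) >> 1): an alternative decomposition, not claimed faster.

-- ===== PORT A =====
-- A's while loop. Python's `bitmap >> 1` is `>>> 1`, `bitmap & 1` is PySem.Int.band.
-- The guard `b ≤ 0` (instead of Python's `b ≠ 0`) only makes the recursion total:
-- on negative values Python's loop never terminates, and Pre_ excludes them.
def bitmapToNodesLoop (b : Int) (i : Int) (acc : List Int) : List Int :=
  if _h : b ≤ 0 then acc
  else
    let i' := i + 1
    let b' := b >>> (1 : Nat)
    let acc' := if PySem.Int.band b' 1 ≠ 0 then acc ++ [i'] else acc
    bitmapToNodesLoop b' i' acc'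
termination_by b.toNat
decreasing_by
  simp only [Int.shiftRight_eq_div_pow]
  omega

def bitmap_to_nodes (bitmap : String) : List Int :=
  match PySem.Int.ofStrBase? bitmap 16 with
  | none => []          -- int(bitmap, 16) raises ValueError: excluded by Pre_
  | some n => bitmapToNodesLoop n 0 []

-- ===== PORT B =====
-- Source B: m = int(bitmap,16) >> 1; s = bin(m)[2:] if m else "";
--       [len(s) - idx for idx, ch in enumerate(s) if ch == '1'][::-1]
-- bin(m)[2:] for the m ≥ 0 admitted by Pre_ is PySem.Int.toBinChars; [::-1] is reverse.
def bitmap_to_nodes_alt (bitmap : String) : List Int :=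
  match PySem.Int.ofStrBase? bitmap 16 with
  | none => []          -- int(bitmap, 16) raises ValueError: excluded by Pre_
  | some n =>
    let m := n >>> (1 : Nat)
    let s : List Char := if m ≠ 0 then PySem.Int.toBinChars m else []
    ((((PySem.List.enumerate s).filter (fun p => p.2 == '1')).map
        (fun p => (s.length : Int) - p.1))).reverse

-- ===== PRECONDITION & SPEC =====
-- Pre_ excludes exactly the strings on which A does not return: those int(·,16)
-- rejects (ValueError) and those parsing to a negative value, on which A's
-- while-loop ("n >> 1" stays negative) never terminates.
def Pre_bitmap_to_nodes (bitmap : String) : Prop :=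
  0 ≤ (PySem.Int.ofStrBase? bitmap 16).getD (-1)
instance (bitmap : String) : Decidable (Pre_bitmap_to_nodes bitmap) := by
  unfold Pre_bitmap_to_nodes; infer_instance

def pvWitness_bitmap_to_nodes : String := "1f"

def Spec_bitmap_to_nodes (bitmap : String) (out : List Int) : Prop := out = bitmap_to_nodes_alt bitmap
instance (bitmap : String) (out : List Int) : Decidable (Spec_bitmap_to_nodes bitmap out) := by unfold Spec_bitmap_to_nodes; infer_instance

-- ===== CLAIM (what is proved, stated in full; the proofs are below) =====
def Claim_equal_bitmap_to_nodes : Prop := ∀ (bitmap : String), Dom_bitmap_to_nodes bitmap → Pre_bitmap_to_nodes bitmap → Spec_bitmap_to_nodes bitmap (bitmap_to_nodes bitmap)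

-- ===== LEMMAS AND PROOFS =====

-- Common description of both results: ascending 1-based set-bit positions of m, offset i.
def bitPositions (m : Nat) (i : Int) : List Int :=
  if m = 0 then []
  else (if m % 2 = 1 then [i] else []) ++ bitPositions (m / 2) (i + 1)

lemma bitPositions_eq (m : Nat) (i : Int) :
    bitPositions m i = (if m % 2 = 1 then [i] else []) ++ bitPositions (m / 2) (i + 1) := by
  rcases eq_or_ne m 0 with h | h
  · subst h; rw [bitPositions, bitPositions]; simp
  · rw [bitPositions]; simp [h]

lemma bitPositions_zero (i : Int) : bitPositions 0 i = [] := by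
  rw [bitPositions]; simp

lemma bitPositions_shift (m : Nat) (i : Int) :
    bitPositions m (i + 1) = (bitPositions m i).map (· + 1) := by
  induction m using Nat.strong_induction_on generalizing i with
  | _ m ih =>
    rcases eq_or_ne m 0 with h | h
    · subst h; simp [bitPositions_zero]
    · rw [bitPositions_eq m (i + 1), bitPositions_eq m i,
        ih (m / 2) (Nat.div_lt_self (Nat.pos_of_ne_zero h) (by norm_num)) (i + 1)]
      by_cases hp : m % 2 = 1 <;> simp [hp]

-- A-side characterisation of the while loop.
lemma loop_eq : ∀ (k : Nat) (b : Int), b.toNat = k → 0 ≤ b → ∀ (i : Int) (acc : List Int),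
    bitmapToNodesLoop b i acc = acc ++ bitPositions (b.toNat / 2) (i + 1) := by
  intro k
  induction k using Nat.strong_induction_on with
  | _ k ih =>
    intro b hk hb i acc
    rw [bitmapToNodesLoop]
    by_cases hle : b ≤ 0
    · have hb0 : b = 0 := le_antisymm hle hb
      subst hb0
      simp [bitPositions_zero]
    · simp only [hle, dite_false]
      have hsh : b >>> (1 : Nat) = b / 2 := by simp [Int.shiftRight_eq_div_pow]
      have hpos : 0 < b := lt_of_not_ge hle
      have hb' : (0:Int) ≤ b / 2 := Int.ediv_nonneg hb (by norm_num)
      have htn : (b / 2).toNat = b.toNat / 2 := by omega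
      have hlt : (b / 2).toNat < k := by omega
      rw [hsh, ih ((b / 2).toNat) hlt (b / 2) rfl hb' (i + 1)]
      have hband : PySem.Int.band (b / 2) 1 = (b / 2) % 2 := by
        rw [PySem.Int.band_one, PySem.Int.mod_eq_emod_of_pos (by norm_num)]
      rw [bitPositions_eq (b.toNat / 2) (i + 1)]
      have hm2 : b.toNat / 2 % 2 = 1 ↔ (b / 2) % 2 ≠ 0 := by omega
      by_cases hodd : b.toNat / 2 % 2 = 1
      · simp only [hband, hm2.mp hodd, if_true, hodd, htn, ne_eq, not_false_iff]
        simp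
      · have : ¬ (b / 2) % 2 ≠ 0 := by omega
        simp only [hband, hodd, if_false, htn, this]
        simp

-- B-side: structural recursion of Nat.toDigits 2 (MSB-first digit string).
lemma toDigitsCore_acc (f : Nat) : ∀ (n : Nat) (ds : List Char),
    Nat.toDigitsCore 2 f n ds = Nat.toDigitsCore 2 f n [] ++ ds := by
  induction f with
  | zero => intro n ds; simp [Nat.toDigitsCore]
  | succ f ih =>
    intro n ds
    simp only [Nat.toDigitsCore]
    by_cases h : n / 2 = 0
    · simp [h]
    · simp only [h, if_false]
      rw [ih (n / 2) [(n % 2).digitChar], ih (n / 2) ((n % 2).digitChar :: ds)]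
      simp

lemma toDigitsCore_fuel (n : Nat) : ∀ (f f' : Nat), n < f → n < f' →
    Nat.toDigitsCore 2 f n [] = Nat.toDigitsCore 2 f' n [] := by
  induction n using Nat.strong_induction_on with
  | _ n ih =>
    intro f f' hf hf'
    obtain ⟨f, rfl⟩ := Nat.exists_eq_succ_of_ne_zero (by omega : f ≠ 0)
    obtain ⟨f', rfl⟩ := Nat.exists_eq_succ_of_ne_zero (by omega : f' ≠ 0)
    simp only [Nat.toDigitsCore]
    by_cases h : n / 2 = 0
    · simp [h]
    · simp only [h, if_false]
      rw [toDigitsCore_acc f (n / 2) [(n % 2).digitChar],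
        toDigitsCore_acc f' (n / 2) [(n % 2).digitChar],
        ih (n / 2) (Nat.div_lt_self (by omega) (by norm_num)) f f' (by omega) (by omega)]

lemma toDigits_two_rec (m : Nat) (h : 2 ≤ m) :
    Nat.toDigits 2 m = Nat.toDigits 2 (m / 2) ++ [(m % 2).digitChar] := by
  have hne : m / 2 ≠ 0 := by omega
  simp only [Nat.toDigits, Nat.toDigitsCore, hne, if_false]
  rw [toDigitsCore_acc m (m / 2) [(m % 2).digitChar]]
  congr 1
  exact toDigitsCore_fuel (m / 2) m (m / 2 + 1) (Nat.div_lt_self (by omega) (by norm_num)) (by omega)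

-- enumerate over an append.
lemma enumerate_append (a b : List Char) (st : Int) :
    PySem.List.enumerate (a ++ b) st
      = PySem.List.enumerate a st ++ PySem.List.enumerate b (st + a.length) := by
  induction a generalizing st with
  | nil => simp [PySem.List.enumerate]
  | cons x t ih =>
    simp only [List.cons_append, PySem.List.enumerate, ih, List.length_cons]
    have harg : st + 1 + (t.length : Int) = st + ((t.length + 1 : Nat) : Int) := by
      push_cast; ring
    rw [harg]

-- B's comprehension as a function of the digit list.
def pickOnes (s : List Char) : List Int :=
  ((((PySem.List.enumerate s).filter (fun p => p.2 == '1')).map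
      (fun p => (s.length : Int) - p.1))).reverse

lemma pickOnes_append_one (a : List Char) (c : Char) :
    pickOnes (a ++ [c])
      = (if c = '1' then [(1:Int)] else []) ++ (pickOnes a).map (· + 1) := by
  unfold pickOnes
  rw [enumerate_append, List.filter_append, List.map_append, List.reverse_append]
  have hf : (fun p : Int × Char => (((a ++ [c]).length : Nat) : Int) - p.1)
      = (fun x : Int => x + 1) ∘ (fun p : Int × Char => ((a.length : Nat) : Int) - p.1) := by
    funext p
    simp only [List.length_append, List.length_singleton, Function.comp_apply]
    push_cast
    omega
  congr 1
  · simp only [PySem.List.enumerate, List.filter_cons, List.filter_nil]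
    by_cases hc : c = '1'
    · simp only [hc, beq_self_eq_true, if_true, List.map_cons, List.map_nil,
        List.reverse_cons, List.reverse_nil, List.nil_append, List.length_append,
        List.length_singleton, List.cons.injEq, and_true]
      push_cast
      omega
    · have hb : (c == '1') = false := by simp [hc]
      simp [hb, hc]
  · rw [hf, ← List.map_map]
    simp [List.map_reverse]

lemma pickOnes_eq (m : Nat) (h : 0 < m) :
    pickOnes (Nat.toDigits 2 m) = bitPositions m 1 := by
  induction m using Nat.strong_induction_on with
  | _ m ih =>
    rcases lt_or_ge m 2 with hm | hm
    · have hm1 : m = 1 := by omega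
      subst hm1
      rw [bitPositions_eq]
      norm_num [bitPositions_zero]
      decide
    · rw [toDigits_two_rec m hm, pickOnes_append_one,
        ih (m / 2) (Nat.div_lt_self (by omega) (by norm_num)) (by omega),
        bitPositions_eq m 1, ← bitPositions_shift]
      have hdig : ((m % 2).digitChar = '1') ↔ m % 2 = 1 := by
        have : m % 2 = 0 ∨ m % 2 = 1 := by omega
        rcases this with h2 | h2 <;> simp [h2, Nat.digitChar]
      by_cases hodd : m % 2 = 1
      · simp [hodd, Nat.digitChar]
      · have : ¬ (m % 2).digitChar = '1' := fun hh => hodd (hdig.mp hh)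
        simp [this, hodd]

-- ===== VERDICT (by name: the statement is the Claim_ definition above) =====
theorem bitmap_to_nodes_spec : Claim_equal_bitmap_to_nodes := by
  intro bitmap _hdom hpre
  unfold Pre_bitmap_to_nodes at hpre
  unfold Spec_bitmap_to_nodes bitmap_to_nodes bitmap_to_nodes_alt
  cases hn : PySem.Int.ofStrBase? bitmap 16 with
  | none => rfl
  | some n =>
    rw [hn] at hpre
    simp only [Option.getD_some] at hpre
    obtain ⟨k, rfl⟩ := Int.eq_ofNat_of_zero_le hpre
    dsimp only
    have hsh : (k : Int) >>> (1 : Nat) = ((k / 2 : Nat) : Int) := by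
      simp [Int.shiftRight_eq_div_pow]
    rw [loop_eq k (k : Int) (by simp) (by positivity) 0 []]
    simp only [Int.toNat_natCast, List.nil_append, zero_add, hsh]
    by_cases hz : k / 2 = 0
    · simp [hz, bitPositions_zero]
    · have hnz : ((k / 2 : Nat) : Int) ≠ 0 := by exact_mod_cast hz
      rw [if_pos hnz]
      have htb : PySem.Int.toBinChars ((k / 2 : Nat) : Int) = Nat.toDigits 2 (k / 2) := by
        simp only [PySem.Int.toBinChars]
        rw [if_neg (not_lt.mpr (Int.natCast_nonneg _))]
        congr 1
      rw [htb]
      exact (pickOnes_eq (k / 2) (Nat.pos_of_ne_zero hz)).symm
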